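-- pv_equiv track=rewrite | github.com/mcindoe/meal-prep | utils.py | combine_ingredients
-- ===== SOURCE A (Python) =====
-- def combine_ingredients(ingredients_iter):
--     combined_ingredients = {}
--     for ingredients in ingredients_iter:
--         for name, quantity in ingredients.items():
--             if name not in combined_ingredients:
--                 combined_ingredients[name] = quantity
--
--             else:
--                 previous_quantity = combined_ingredients[name]
--                 if isinstance(previous_quantity, bool):
--                     combined_ingredients[name] = True
--                 else:
--                     combined_ingredients[name] = previous_quantity + quantity
--
--     return combined_ingredients
-- ===== SOURCE B (Python) =====
-- def combine_ingredients(ingredients_iter):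
--     # Two passes: group quantities per name in encounter order, then reduce each group.
--     groups = {}
--     for ingredients in ingredients_iter:
--         for name, quantity in ingredients.items():
--             groups.setdefault(name, []).append(quantity)
--     combined = {}
--     for name, quantities in groups.items():
--         acc = quantities[0]
--         for q in quantities[1:]:
--             acc = True if isinstance(acc, bool) else acc + q
--         combined[name] = acc
--     return combined
-- ===== Notes on version B (the rewrite author's own statement) =====
-- stated objective: alternative
-- what changed: Replaces A's interleaved single-pass dict accumulation with a two-phase decomposition: first group every (name, quantity) occurrence into a name -> list-of-quantities table, then reduce each group left-to-right seeded with its first element.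
import Mathlib
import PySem

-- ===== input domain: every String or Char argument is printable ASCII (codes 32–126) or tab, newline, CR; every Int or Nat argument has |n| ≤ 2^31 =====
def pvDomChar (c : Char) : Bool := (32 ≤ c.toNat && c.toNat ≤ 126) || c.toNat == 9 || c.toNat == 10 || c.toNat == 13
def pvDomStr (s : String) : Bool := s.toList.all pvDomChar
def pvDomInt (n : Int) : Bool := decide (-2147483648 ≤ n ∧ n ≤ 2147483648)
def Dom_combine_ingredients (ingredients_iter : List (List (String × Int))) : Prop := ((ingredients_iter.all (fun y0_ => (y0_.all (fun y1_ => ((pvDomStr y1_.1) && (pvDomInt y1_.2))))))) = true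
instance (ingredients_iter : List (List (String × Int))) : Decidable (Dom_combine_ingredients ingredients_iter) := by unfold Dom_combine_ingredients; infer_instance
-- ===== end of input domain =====

-- B replaces A's interleaved accumulate-into-a-dict loop by a two-phase group-then-reduce decomposition (alternative structure, same cost).


-- ===== PORT A =====
-- A's loop body: 'if name not in combined: combined[name] = q else: combined[name] = prev + q'
-- (the 'isinstance(prev, bool)' branch of A is unreachable for int quantities, the declared value type).
def pvStepA (d : PySem.Dict String Int) (p : String × Int) : PySem.Dict String Int :=
  match d.get? p.1 with
  | none => d.insert p.1 p.2
  | some prev => d.insert p.1 (prev + p.2)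

def combine_ingredients (ingredients_iter : List (List (String × Int))) : List (String × Int) :=
  (ingredients_iter.foldl (fun d ing => ing.foldl pvStepA d) PySem.Dict.empty).items

-- ===== PORT B =====
-- reduce of one group: seed with the first quantity, then add the rest left-to-right
-- (the 'isinstance(acc, bool)' guard of Source B is unreachable for int quantities; [] never occurs, 0 is a totality filler).
def pvRed : List Int → Int
  | [] => 0
  | h :: t => t.foldl (· + ·) h

-- phase 1 of B: groups.setdefault(name, []).append(quantity)
def pvStepB (d : PySem.Dict String (List Int)) (p : String × Int) : PySem.Dict String (List Int) :=
  d.modify p.1 [] (fun l => l ++ [p.2])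

def pvGroup (ingredients_iter : List (List (String × Int))) : PySem.Dict String (List Int) :=
  ingredients_iter.foldl (fun d ing => ing.foldl pvStepB d) PySem.Dict.empty

-- phase 2 of B: combined[name] = reduce of the group
def combine_ingredients_alt (ingredients_iter : List (List (String × Int))) : List (String × Int) :=
  ((pvGroup ingredients_iter).items.foldl
    (fun r (p : String × List Int) => r.insert p.1 (pvRed p.2)) PySem.Dict.empty).items

-- ===== PRECONDITION & SPEC =====
def Spec_combine_ingredients (ingredients_iter : List (List (String × Int))) (out : List (String × Int)) : Prop := out = combine_ingredients_alt ingredients_iter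
instance (ingredients_iter : List (List (String × Int))) (out : List (String × Int)) : Decidable (Spec_combine_ingredients ingredients_iter out) := by unfold Spec_combine_ingredients; infer_instance

-- ===== CLAIM (what is proved, stated in full; the proofs are below) =====
def Claim_equal_combine_ingredients : Prop := ∀ (ingredients_iter : List (List (String × Int))), Dom_combine_ingredients ingredients_iter → Spec_combine_ingredients ingredients_iter (combine_ingredients ingredients_iter)

-- ===== LEMMAS AND PROOFS =====

-- per-item view of one reduced group
def pvF (p : String × List Int) : String × Int := (p.1, pvRed p.2)

theorem pv_get?_map_F (l : List (String × List Int)) (k : String) :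
    (PySem.Dict.mk (l.map pvF)).get? k = ((PySem.Dict.mk l).get? k).map pvRed := by
  simp [PySem.Dict.get?, List.find?_map, Option.map_map]
  have : ((fun p : String × Int => p.1 == k) ∘ pvF) = (fun p : String × List Int => p.1 == k) := by
    funext p; rfl
  rw [this]
  rfl

theorem pv_contains_map_F (l : List (String × List Int)) (k : String) :
    (PySem.Dict.mk (l.map pvF)).contains k = (PySem.Dict.mk l).contains k := by
  unfold PySem.Dict.contains
  rw [PySem.Dict.items, List.any_map]
  rfl

theorem pv_insert_map_F (l : List (String × List Int)) (k : String) (v : List Int) :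
    (PySem.Dict.mk (l.map pvF)).insert k (pvRed v)
      = PySem.Dict.mk ((((PySem.Dict.mk l).insert k v).items).map pvF) := by
  by_cases h : (PySem.Dict.mk l).contains k = true
  · rw [PySem.Dict.items_insert_of_contains _ _ h]
    unfold PySem.Dict.insert
    rw [pv_contains_map_F, if_pos h]
    simp only [List.map_map]
    congr 1
    apply List.map_congr_left
    intro p _
    by_cases hp : p.1 = k <;> simp [pvF, hp]
  · have h' : (PySem.Dict.mk l).contains k = false := Bool.eq_false_iff.mpr h
    rw [PySem.Dict.items_insert_of_not_contains _ _ h']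
    unfold PySem.Dict.insert
    rw [pv_contains_map_F, if_neg h]
    simp [pvF]

theorem pv_red_append (l : List Int) (q : Int) (h : l ≠ []) :
    pvRed (l ++ [q]) = pvRed l + q := by
  cases l with
  | nil => exact absurd rfl h
  | cons a t => simp [pvRed, List.foldl_append]

theorem pv_get?_mem (g : PySem.Dict String (List Int)) (k : String) (v : List Int)
    (h : g.get? k = some v) : (k, v) ∈ g.items := by
  unfold PySem.Dict.get? at h
  obtain ⟨p, hp, hv⟩ := Option.map_eq_some_iff.mp h
  have hmem := List.mem_of_find?_eq_some hp
  have hk := List.find?_some hp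
  have : p.1 = k := by simpa using hk
  cases p
  simp_all

theorem pv_step_commute (g : PySem.Dict String (List Int)) (p : String × Int)
    (hg : ∀ q ∈ g.items, q.2 ≠ []) :
    pvStepA (PySem.Dict.mk (g.items.map pvF)) p
      = PySem.Dict.mk (((pvStepB g p).items).map pvF) := by
  unfold pvStepA pvStepB PySem.Dict.modify
  cases g
  rename_i l
  rw [pv_get?_map_F]
  cases h : (PySem.Dict.mk l).get? p.1 with
  | none =>
    simp only [Option.map_none]
    have : (PySem.Dict.mk l).getD p.1 [] = [] := by
      simp [PySem.Dict.getD, h]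
    rw [this]
    have := pv_insert_map_F l p.1 [p.2]
    simpa [pvRed] using this
  | some v =>
    simp only [Option.map_some]
    have hv : v ≠ [] := hg (p.1, v) (pv_get?_mem _ _ _ h)
    have hd : (PySem.Dict.mk l).getD p.1 [] = v := by
      simp [PySem.Dict.getD, h]
    rw [hd]
    have := pv_insert_map_F l p.1 (v ++ [p.2])
    rw [pv_red_append v p.2 hv] at this
    exact this

theorem pv_step_inv (g : PySem.Dict String (List Int)) (p : String × Int)
    (hg : ∀ q ∈ g.items, q.2 ≠ []) :
    ∀ q ∈ (pvStepB g p).items, q.2 ≠ [] := by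
  intro q hq
  unfold pvStepB PySem.Dict.modify at hq
  rcases (PySem.Dict.mem_items_insert _ _ _ _).mp hq with h | ⟨h, _⟩
  · subst h; simp
  · exact hg q h

theorem pv_step_keys (g : PySem.Dict String (List Int)) (p : String × Int)
    (hg : g.keys.Nodup) : (pvStepB g p).keys.Nodup := by
  unfold pvStepB PySem.Dict.modify
  exact PySem.Dict.nodup_keys_insert _ _ _ hg

-- main loop invariant: A's accumulator is the reduced image of B's grouping accumulator
theorem pv_loop (ps : List (String × Int)) :
    ∀ g : PySem.Dict String (List Int), (∀ q ∈ g.items, q.2 ≠ []) →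
      ps.foldl pvStepA (PySem.Dict.mk (g.items.map pvF))
        = PySem.Dict.mk (((ps.foldl pvStepB g).items).map pvF)
      ∧ (∀ q ∈ (ps.foldl pvStepB g).items, q.2 ≠ []) := by
  induction ps with
  | nil => intro g hg; exact ⟨rfl, hg⟩
  | cons p ps ih =>
    intro g hg
    have hc := pv_step_commute g p hg
    have hi := pv_step_inv g p hg
    have := ih (pvStepB g p) hi
    constructor
    · simpa [List.foldl_cons, hc] using this.1
    · simpa [List.foldl_cons] using this.2

theorem pv_group_flat (xs : List (List (String × Int))) :
    pvGroup xs = xs.flatten.foldl pvStepB PySem.Dict.empty := by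
  unfold pvGroup
  exact (List.foldl_flatten).symm

theorem pv_group_keys (xs : List (List (String × Int))) : (pvGroup xs).keys.Nodup := by
  rw [pv_group_flat]
  have key : ∀ (ps : List (String × Int)) (g : PySem.Dict String (List Int)),
      g.keys.Nodup → (ps.foldl pvStepB g).keys.Nodup := by
    intro ps
    induction ps with
    | nil => intro g hg; exact hg
    | cons p ps ih => intro g hg; exact ih _ (pv_step_keys g p hg)
  exact key xs.flatten PySem.Dict.empty (by simp [PySem.Dict.empty, PySem.Dict.keys])

-- phase 2 of B just maps pvF over the group items (keys fresh each time)
theorem pv_phase2 (l : List (String × List Int)) :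
    ∀ r : PySem.Dict String Int,
      (∀ p ∈ l, r.contains p.1 = false) → (l.map (·.1)).Nodup →
      (l.foldl (fun r (p : String × List Int) => r.insert p.1 (pvRed p.2)) r).items
        = r.items ++ l.map pvF := by
  induction l with
  | nil => intro r _ _; simp
  | cons p l ih =>
    intro r hfresh hnd
    have hp : r.contains p.1 = false := hfresh p (by simp)
    have hins : (r.insert p.1 (pvRed p.2)).items = r.items ++ [(p.1, pvRed p.2)] :=
      PySem.Dict.items_insert_of_not_contains _ _ hp
    have hfresh' : ∀ q ∈ l, (r.insert p.1 (pvRed p.2)).contains q.1 = false := by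
      intro q hq
      have hne : q.1 ≠ p.1 := by
        have := hnd
        simp only [List.map_cons, List.nodup_cons] at this
        intro h; exact this.1 (h ▸ List.mem_map_of_mem hq)
      have hq' : r.contains q.1 = false := hfresh q (by simp [hq])
      unfold PySem.Dict.contains at hq' ⊢
      rw [hins, List.any_append]
      simp only [List.any_cons, List.any_nil, Bool.or_false, Bool.or_eq_false_iff]
      refine ⟨hq', ?_⟩
      simpa using fun h => hne h.symm
    have hnd' : (l.map (·.1)).Nodup := by
      simp only [List.map_cons, List.nodup_cons] at hnd; exact hnd.2
    rw [List.foldl_cons, ih _ hfresh' hnd', hins]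
    simp [pvF]

-- ===== VERDICT (by name: the statement is the Claim_ definition above) =====
theorem combine_ingredients_spec : Claim_equal_combine_ingredients := by
  intro xs _
  unfold Spec_combine_ingredients combine_ingredients combine_ingredients_alt
  have hflat : xs.foldl (fun d ing => ing.foldl pvStepA d) PySem.Dict.empty
      = xs.flatten.foldl pvStepA PySem.Dict.empty := (List.foldl_flatten).symm
  rw [hflat]
  have hA := (pv_loop xs.flatten PySem.Dict.empty (by simp [PySem.Dict.empty])).1
  have hempty : (PySem.Dict.empty : PySem.Dict String Int)
      = PySem.Dict.mk (((PySem.Dict.empty : PySem.Dict String (List Int)).items).map pvF) := rfl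
  rw [show xs.flatten.foldl pvStepA PySem.Dict.empty
        = xs.flatten.foldl pvStepA (PySem.Dict.mk (((PySem.Dict.empty : PySem.Dict String (List Int)).items).map pvF)) from by rw [← hempty]]
  rw [hA, ← pv_group_flat]
  rw [pv_phase2 (pvGroup xs).items PySem.Dict.empty
      (by intro p _; simp [PySem.Dict.empty, PySem.Dict.contains])
      (by simpa [PySem.Dict.keys] using pv_group_keys xs)]
  simp [PySem.Dict.empty]
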